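-- pv_equiv track=rewrite | github.com/gorzalczany/advent-of-code | 2024/12/solve.py | countWallsInDirection
-- ===== SOURCE A (Python) =====
-- def applyVector(a, ab):
--     ax, ay = a
--     dx, dy = ab
--     return (ax+dx, ay+dy)
--
-- def countWallsInDirection(observationVector, moveVector, region_adjacents, region):
--     walls = 0
--     adjacentsToCheck = region_adjacents.copy()
--     while(len(adjacentsToCheck)>0):
--         current = adjacentsToCheck.pop()
--         lookingAt = applyVector(current, observationVector)
--
--         # check if there is a wall in direction we are "looking at"
--         if lookingAt not in region: continue
--         walls+=1
--
--         # mark all adjacents to same wall as checked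
--         # by "walking" next to the wall in both directions and "looking at" it
--         for moveVector in [((moveVector[0]*i), moveVector[1]*i) for i in [-1, 1] ]:
--             next = current
--             while True:
--                 next = applyVector(next, moveVector)
--                 if next in region:
--                     # if walked into another wall it means that current one ended
--                     break
--                 lookingAt = applyVector(next, observationVector)
--                 adjacentsToCheck.discard(next)
--                 if lookingAt not in region:
--                     # if wall "disapeared" that means it ended
--                     break
--     return walls
-- ===== SOURCE B (Python) =====
-- def applyVector(a, ab):
--     ax, ay = a
--     dx, dy = ab
--     return (ax+dx, ay+dy)
--
-- def countWallsInDirection(observationVector, moveVector, region_adjacents, region):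
--     def isWall(c):
--         return c not in region and applyVector(c, observationVector) in region
--     S = {c for c in region_adjacents if isWall(c)}
--     back = (-moveVector[0], -moveVector[1])
--     def startsRun(c):
--         p = applyVector(c, back)
--         while isWall(p):
--             if p in S:
--                 return False
--             p = applyVector(p, back)
--         return True
--     return sum(1 for c in S if startsRun(c))
-- ===== Notes on version B (the rewrite author's own statement) =====
-- stated objective: simpler
-- what changed: Replaces A's destructive pop/walk/discard loop over a mutable copy of the set by a non-mutating set comprehension of wall-facing cells plus a per-cell run-start test (walk backwards along -moveVector through wall cells until a set member or the wall ends), counting one cell per wall segment.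
-- outside the precondition, e.g. on countWallsInDirection((0, 1), (1, 0), {(0, 0)}, {(0, 1), (0, 0)}): A returns 1, B returns 0; on countWallsInDirection((0, 1), (1, 0), {(1, 0), (0, 0)}, {(0, 1), (1, 1), (0, 0)}): A returns 2, B returns 1
import Mathlib
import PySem

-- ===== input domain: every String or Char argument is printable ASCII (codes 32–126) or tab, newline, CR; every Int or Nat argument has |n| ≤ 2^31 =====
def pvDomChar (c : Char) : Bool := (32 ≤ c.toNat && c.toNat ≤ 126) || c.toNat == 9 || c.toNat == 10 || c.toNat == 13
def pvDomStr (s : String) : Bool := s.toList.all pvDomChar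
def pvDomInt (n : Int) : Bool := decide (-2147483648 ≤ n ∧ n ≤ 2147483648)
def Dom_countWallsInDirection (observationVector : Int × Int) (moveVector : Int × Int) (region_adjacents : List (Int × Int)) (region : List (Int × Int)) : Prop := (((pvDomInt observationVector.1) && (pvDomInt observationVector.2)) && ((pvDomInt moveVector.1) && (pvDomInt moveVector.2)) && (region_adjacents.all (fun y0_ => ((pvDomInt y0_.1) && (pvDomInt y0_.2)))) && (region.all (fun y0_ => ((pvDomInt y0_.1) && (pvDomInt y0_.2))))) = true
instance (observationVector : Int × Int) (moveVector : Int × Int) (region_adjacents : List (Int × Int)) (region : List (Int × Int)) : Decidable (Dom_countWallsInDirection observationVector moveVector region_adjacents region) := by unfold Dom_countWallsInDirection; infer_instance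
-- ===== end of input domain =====

-- B replaces A's destructive pop/walk/discard loop by a non-mutating comprehension of
-- wall-facing cells plus a backwards run-start test (objective: simpler; same cost).
-- A mutates only its own copy of region_adjacents, so no caller-visible mutation is at stake.


-- ===== PORT A =====
-- helper shared by both Pythons
def applyVector (a ab : Int × Int) : Int × Int := (a.1 + ab.1, a.2 + ab.2)

-- the inner 'while True' walk of A: moves by moveVector, discarding visited cells.
-- The Nat argument is fuel, a totality guard only: region.length + 1 provably suffices
-- under Pre_ (each continuing step pins a distinct member of region).
def walkA (observationVector moveVector : Int × Int) (region : List (Int × Int)) : Nat → (Int × Int) → List (Int × Int) → List (Int × Int)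
  | 0, _, toCheck => toCheck
  | fuel+1, cur, toCheck =>
      let next := applyVector cur moveVector
      if next ∈ region then toCheck
      else
        let toCheck' := PySem.Set.discard toCheck next
        if applyVector next observationVector ∈ region then
          walkA observationVector moveVector region fuel next toCheck'
        else toCheck'

-- the outer 'while len(adjacentsToCheck)>0' loop of A.  Python's set.pop takes an
-- unspecified (hash-order) element; we pop the head — under Pre_ the returned count is
-- provably independent of that order.  Fuel = initial size (each iteration pops one).
def loopA (observationVector moveVector : Int × Int) (region : List (Int × Int)) : Nat → List (Int × Int) → Int → Int
  | 0, _, walls => walls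
  | _+1, [], walls => walls
  | fuel+1, current :: rest, walls =>
      if applyVector current observationVector ∈ region then
        let r1 := walkA observationVector (moveVector.1 * (-1), moveVector.2 * (-1)) region (region.length + 1) current rest
        let r2 := walkA observationVector (moveVector.1 * 1, moveVector.2 * 1) region (region.length + 1) current r1
        loopA observationVector moveVector region fuel r2 (walls + 1)
      else
        loopA observationVector moveVector region fuel rest walls

def countWallsInDirection (observationVector : Int × Int) (moveVector : Int × Int) (region_adjacents : List (Int × Int)) (region : List (Int × Int)) : Int :=
  loopA observationVector moveVector region region_adjacents.length region_adjacents 0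

-- ===== PORT B =====
def isWall (observationVector : Int × Int) (region : List (Int × Int)) (c : Int × Int) : Bool :=
  decide (c ∉ region) && decide (applyVector c observationVector ∈ region)

-- B's 'while isWall(p)' backwalk; fuel = region.length + 1 provably suffices.
def startsRun (observationVector back : Int × Int) (region S : List (Int × Int)) : Nat → (Int × Int) → Bool
  | 0, _ => true
  | fuel+1, p =>
      if isWall observationVector region p then
        if p ∈ S then false
        else startsRun observationVector back region S fuel (applyVector p back)
      else true

def countWallsInDirection_alt (observationVector : Int × Int) (moveVector : Int × Int) (region_adjacents : List (Int × Int)) (region : List (Int × Int)) : Int :=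
  let S := PySem.Set.ofList (region_adjacents.filter (isWall observationVector region))
  let back := (-moveVector.1, -moveVector.2)
  ((S.filter (fun c => startsRun observationVector back region S (region.length + 1) (applyVector c back))).length : Int)

-- ===== PRECONDITION & SPEC =====
-- Pre_ excludes (with a cite each) inputs whose adjacent set overlaps the region — there A
-- counts in-region cells as walls and the count depends on Python's hash-based set.pop
-- order, so no value is canonical — and the degenerate moveVector (0,0) facing a wall, on
-- which A loops forever (no return).  Nodup is the list model of the Python set argument.
def Pre_countWallsInDirection (observationVector : Int × Int) (moveVector : Int × Int) (region_adjacents : List (Int × Int)) (region : List (Int × Int)) : Prop :=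
  region_adjacents.Nodup ∧ (∀ c ∈ region_adjacents, c ∉ region) ∧
    (moveVector = (0, 0) → ∀ c ∈ region_adjacents, applyVector c observationVector ∉ region)
instance (observationVector : Int × Int) (moveVector : Int × Int) (region_adjacents : List (Int × Int)) (region : List (Int × Int)) : Decidable (Pre_countWallsInDirection observationVector moveVector region_adjacents region) := by unfold Pre_countWallsInDirection; infer_instance

def pvWitness_countWallsInDirection : (Int × Int) × (Int × Int) × (List (Int × Int)) × (List (Int × Int)) :=
  ((0, 1), (1, 0), [(0, 0), (1, 0), (3, 0)], [(0, 1), (1, 1), (3, 1)])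

def Spec_countWallsInDirection (observationVector : Int × Int) (moveVector : Int × Int) (region_adjacents : List (Int × Int)) (region : List (Int × Int)) (out : Int) : Prop := out = countWallsInDirection_alt observationVector moveVector region_adjacents region
instance (observationVector : Int × Int) (moveVector : Int × Int) (region_adjacents : List (Int × Int)) (region : List (Int × Int)) (out : Int) : Decidable (Spec_countWallsInDirection observationVector moveVector region_adjacents region out) := by unfold Spec_countWallsInDirection; infer_instance

-- ===== CLAIM (what is proved, stated in full; the proofs are below) =====
def Claim_equal_countWallsInDirection : Prop := ∀ (observationVector : Int × Int) (moveVector : Int × Int) (region_adjacents : List (Int × Int)) (region : List (Int × Int)), Dom_countWallsInDirection observationVector moveVector region_adjacents region → Pre_countWallsInDirection observationVector moveVector region_adjacents region → Spec_countWallsInDirection observationVector moveVector region_adjacents region (countWallsInDirection observationVector moveVector region_adjacents region)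

-- ===== LEMMAS AND PROOFS =====

-- the point i steps from c in direction d
def pt (d c : Int × Int) (i : Int) : Int × Int := (c.1 + i * d.1, c.2 + i * d.2)

theorem pt_zero (d c : Int × Int) : pt d c 0 = c := by simp [pt]

theorem pt_succ (d c : Int × Int) (i : Int) : applyVector (pt d c i) d = pt d c (i + 1) := by
  simp only [pt, applyVector, Prod.mk.injEq]; constructor <;> ring

theorem pt_neg (d c : Int × Int) (i : Int) : pt (-d.1, -d.2) c i = pt d c (-i) := by
  simp only [pt, Prod.mk.injEq]; constructor <;> ring

theorem pt_pt (d c : Int × Int) (i j : Int) : pt d (pt d c i) j = pt d c (i + j) := by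
  simp only [pt, Prod.mk.injEq]; constructor <;> ring

theorem pt_inj (d c : Int × Int) (hd : d ≠ (0, 0)) {i j : Int} (h : pt d c i = pt d c j) : i = j := by
  simp only [pt, Prod.mk.injEq, add_right_inj] at h
  have hd' : d.1 ≠ 0 ∨ d.2 ≠ 0 := by
    by_contra hc; push_neg at hc
    exact hd (Prod.ext hc.1 hc.2)
  rcases hd' with h1 | h1
  · exact mul_right_cancel₀ h1 h.1
  · exact mul_right_cancel₀ h1 h.2

theorem isWall_iff (obs : Int × Int) (region : List (Int × Int)) (c : Int × Int) :
    isWall obs region c = true ↔ c ∉ region ∧ applyVector c obs ∈ region := by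
  simp [isWall]

-- a chain of wall cells pins distinct members of region, so its length is ≤ region.length
theorem chain_bound (obs d : Int × Int) (region : List (Int × Int)) (hd : d ≠ (0, 0)) (c : Int × Int)
    (K : Int) (h : ∀ j : Int, 1 ≤ j → j ≤ K → isWall obs region (pt d c j) = true) :
    K ≤ (region.length : Int) := by
  by_contra hK
  push_neg at hK
  set f : Nat → Int × Int := fun n => applyVector (pt d c ((n : Int) + 1)) obs with hf
  have hinj : Function.Injective f := by
    intro a b hab
    simp only [hf, applyVector, Prod.mk.injEq, add_left_inj] at hab
    have : pt d c ((a : Int) + 1) = pt d c ((b : Int) + 1) := Prod.ext hab.1 hab.2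
    have := pt_inj d c hd this
    omega
  have hnd : ((List.range (region.length + 1)).map f).Nodup :=
    (List.nodup_range).map hinj
  have hsub : ((List.range (region.length + 1)).map f) ⊆ region := by
    intro y hy
    simp only [List.mem_map, List.mem_range] at hy
    obtain ⟨n, hn, rfl⟩ := hy
    have hw := h ((n : Int) + 1) (by omega) (by
      have : (n : Int) < ((region.length + 1 : Nat) : Int) := by exact_mod_cast hn
      push_cast at this ⊢
      omega)
    exact ((isWall_iff obs region _).mp hw).2
  have := (hnd.subperm hsub).length_le
  simp only [List.length_map, List.length_range] at this
  omega

-- the set of cells A's walk from c in direction d discards (bounded, computable form)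
def discD (obs d : Int × Int) (region : List (Int × Int)) (c x : Int × Int) : Bool :=
  decide (∃ k : Nat, k < region.length + 2 ∧ (0:Int) < (k:Int) ∧ x = pt d c (k:Int) ∧
    (∀ j : Int, (0:Int) < j → j < (k:Int) → isWall obs region (pt d c j) = true) ∧ x ∉ region)

def DiscP (obs d : Int × Int) (region : List (Int × Int)) (c x : Int × Int) : Prop :=
  ∃ k : Int, 1 ≤ k ∧ x = pt d c k ∧
    (∀ j : Int, 1 ≤ j → j < k → isWall obs region (pt d c j) = true) ∧ x ∉ region

theorem discD_iff (obs d : Int × Int) (region : List (Int × Int)) (hd : d ≠ (0, 0)) (c x : Int × Int) :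
    discD obs d region c x = true ↔ DiscP obs d region c x := by
  simp only [discD, decide_eq_true_eq, DiscP]
  constructor
  · rintro ⟨k, _, hk0, hx, hch, hnr⟩
    exact ⟨(k : Int), by omega, hx, fun j h1 h2 => hch j (by omega) h2, hnr⟩
  · rintro ⟨k, hk1, hx, hch, hnr⟩
    have hbd : k - 1 ≤ (region.length : Int) :=
      chain_bound obs d region hd c (k - 1) (fun j h1 h2 => hch j h1 (by omega))
    have hkc : ((k.toNat : Nat) : Int) = k := Int.toNat_of_nonneg (by omega)
    refine ⟨k.toNat, by omega, by omega, by rw [hkc]; exact hx, ?_, hnr⟩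
    intro j h1 h2
    rw [hkc] at h2
    exact hch j (by omega) h2

-- "some earlier wall cell along -mv is in S" (bounded, computable form)
def hasPrevD (obs mv : Int × Int) (region S : List (Int × Int)) (x : Int × Int) : Bool :=
  decide (∃ k : Nat, k < region.length + 1 ∧ (0:Int) < (k:Int) ∧
    (∀ j : Int, 1 ≤ j → j ≤ (k:Int) → isWall obs region (pt mv x (-j)) = true) ∧ pt mv x (-(k:Int)) ∈ S)

def HasPrevP (obs mv : Int × Int) (region S : List (Int × Int)) (x : Int × Int) : Prop :=
  ∃ k : Int, 1 ≤ k ∧ (∀ j : Int, 1 ≤ j → j ≤ k → isWall obs region (pt mv x (-j)) = true) ∧ pt mv x (-k) ∈ S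

theorem hasPrevD_iff (obs mv : Int × Int) (region S : List (Int × Int)) (hmv : mv ≠ (0, 0)) (x : Int × Int) :
    hasPrevD obs mv region S x = true ↔ HasPrevP obs mv region S x := by
  have hneg : ((-mv.1, -mv.2) : Int × Int) ≠ (0, 0) := by
    intro hc
    simp only [Prod.mk.injEq, neg_eq_zero] at hc
    exact hmv (Prod.ext hc.1 hc.2)
  simp only [hasPrevD, decide_eq_true_eq, HasPrevP]
  constructor
  · rintro ⟨k, _, hk0, hch, hmem⟩
    exact ⟨(k : Int), by omega, hch, hmem⟩
  · rintro ⟨k, hk1, hch, hmem⟩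
    have hbd : k ≤ (region.length : Int) := by
      have := chain_bound obs (-mv.1, -mv.2) region hneg x k (fun j h1 h2 => by
        rw [pt_neg]; exact hch j h1 h2)
      omega
    have hkc : ((k.toNat : Nat) : Int) = k := Int.toNat_of_nonneg (by omega)
    refine ⟨k.toNat, by omega, by omega, ?_, by rw [hkc]; exact hmem⟩
    intro j h1 h2
    rw [hkc] at h2
    exact hch j h1 h2

-- A's walk = a filter by the discard predicate
theorem walkA_go (obs d : Int × Int) (region : List (Int × Int)) (hd : d ≠ (0, 0)) (c : Int × Int) :
    ∀ (fuel : Nat) (k₀ : Int) (T : List (Int × Int)), 0 ≤ k₀ →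
      (∀ j : Int, 1 ≤ j → j ≤ k₀ → isWall obs region (pt d c j) = true) →
      (region.length : Int) + 1 ≤ (fuel : Int) + k₀ →
      walkA obs d region fuel (pt d c k₀) T =
        T.filter (fun x => ! decide (∃ k : Nat, k < region.length + 2 ∧ k₀ < (k:Int) ∧ x = pt d c (k:Int) ∧
          (∀ j : Int, k₀ < j → j < (k:Int) → isWall obs region (pt d c j) = true) ∧ x ∉ region)) := by
  intro fuel
  induction fuel with
  | zero =>
    intro k₀ T hk0 hchain hfuel
    exfalso
    have := chain_bound obs d region hd c k₀ hchain
    omega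
  | succ fuel ih =>
    intro k₀ T hk0 hchain hfuel
    have hstep : walkA obs d region (fuel + 1) (pt d c k₀) T =
        (if applyVector (pt d c k₀) d ∈ region then T
         else
           let T' := PySem.Set.discard T (applyVector (pt d c k₀) d)
           if applyVector (applyVector (pt d c k₀) d) obs ∈ region then
             walkA obs d region fuel (applyVector (pt d c k₀) d) T'
           else T') := rfl
    rw [hstep, pt_succ]
    by_cases hmem : pt d c (k₀ + 1) ∈ region
    · rw [if_pos hmem]
      symm
      apply List.filter_eq_self.mpr
      intro x _
      simp only [Bool.not_eq_eq_eq_not, Bool.not_true, decide_eq_false_iff_not]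
      rintro ⟨k, _, hkgt, hx, hch, hnr⟩
      rcases eq_or_lt_of_le (by omega : k₀ + 1 ≤ (k : Int)) with heq | hlt
      · rw [hx, ← heq] at hnr; exact hnr hmem
      · have := hch (k₀ + 1) (by omega) hlt
        exact ((isWall_iff obs region _).mp this).1 hmem
    · rw [if_neg hmem]
      have hdisc : PySem.Set.discard T (pt d c (k₀ + 1)) =
          T.filter (fun y => !(y == pt d c (k₀ + 1))) := rfl
      by_cases hface : applyVector (pt d c (k₀ + 1)) obs ∈ region
      · rw [if_pos hface]
        have hW : isWall obs region (pt d c (k₀ + 1)) = true :=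
          (isWall_iff obs region _).mpr ⟨hmem, hface⟩
        have hchain' : ∀ j : Int, 1 ≤ j → j ≤ k₀ + 1 → isWall obs region (pt d c j) = true := by
          intro j h1 h2
          by_cases hj : j ≤ k₀
          · exact hchain j h1 hj
          · have : j = k₀ + 1 := by omega
            rw [this]; exact hW
        have hih := ih (k₀ + 1) (T.filter (fun y => !(y == pt d c (k₀ + 1)))) (by omega) hchain' (by push_cast; omega)
        rw [show PySem.Set.discard T (pt d c (k₀ + 1)) = T.filter (fun y => !(y == pt d c (k₀ + 1))) from rfl,
          hih, List.filter_filter]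
        apply List.filter_congr
        intro x _
        have hiff : (∃ k : Nat, k < region.length + 2 ∧ k₀ < (k:Int) ∧ x = pt d c (k:Int) ∧
              (∀ j : Int, k₀ < j → j < (k:Int) → isWall obs region (pt d c j) = true) ∧ x ∉ region) ↔
            (x = pt d c (k₀ + 1) ∨
              (∃ k : Nat, k < region.length + 2 ∧ k₀ + 1 < (k:Int) ∧ x = pt d c (k:Int) ∧
              (∀ j : Int, k₀ + 1 < j → j < (k:Int) → isWall obs region (pt d c j) = true) ∧ x ∉ region)) := by
          constructor
          · rintro ⟨k, hb, hkgt, hx, hch, hnr⟩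
            rcases eq_or_lt_of_le (by omega : k₀ + 1 ≤ (k : Int)) with heq | hlt
            · left; rw [hx, ← heq]
            · right
              exact ⟨k, hb, hlt, hx, fun j h1 h2 => hch j (by omega) h2, hnr⟩
          · rintro (hx | ⟨k, hb, hkgt, hx, hch, hnr⟩)
            · have hbd : k₀ ≤ (region.length : Int) := chain_bound obs d region hd c k₀ hchain
              have hkc : (((k₀ + 1).toNat : Nat) : Int) = k₀ + 1 := Int.toNat_of_nonneg (by omega)
              refine ⟨(k₀ + 1).toNat, by omega, by omega, by rw [hkc]; exact hx, ?_, ?_⟩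
              · intro j h1 h2; rw [hkc] at h2; omega
              · rw [hx]; exact hmem
            · refine ⟨k, hb, by omega, hx, ?_, hnr⟩
              intro j h1 h2
              by_cases hj : j = k₀ + 1
              · rw [hj]; exact hW
              · exact hch j (by omega) h2

        have hd2 : (decide (∃ k : Nat, k < region.length + 2 ∧ k₀ < (k:Int) ∧ x = pt d c (k:Int) ∧
              (∀ j : Int, k₀ < j → j < (k:Int) → isWall obs region (pt d c j) = true) ∧ x ∉ region) : Bool) =
            decide (x = pt d c (k₀ + 1) ∨
              (∃ k : Nat, k < region.length + 2 ∧ k₀ + 1 < (k:Int) ∧ x = pt d c (k:Int) ∧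
              (∀ j : Int, k₀ + 1 < j → j < (k:Int) → isWall obs region (pt d c j) = true) ∧ x ∉ region)) :=
          decide_eq_decide.mpr hiff
        rw [hd2]
        by_cases h1 : x = pt d c (k₀ + 1) <;>
          by_cases h2 : (∃ k : Nat, k < region.length + 2 ∧ k₀ + 1 < (k:Int) ∧ x = pt d c (k:Int) ∧
              (∀ j : Int, k₀ + 1 < j → j < (k:Int) → isWall obs region (pt d c j) = true) ∧ x ∉ region) <;>
          simp [h1, h2]
      · rw [if_neg hface]
        rw [hdisc]
        apply List.filter_congr
        intro x _
        have hiff : (∃ k : Nat, k < region.length + 2 ∧ k₀ < (k:Int) ∧ x = pt d c (k:Int) ∧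
              (∀ j : Int, k₀ < j → j < (k:Int) → isWall obs region (pt d c j) = true) ∧ x ∉ region) ↔
            x = pt d c (k₀ + 1) := by
          constructor
          · rintro ⟨k, hb, hkgt, hx, hch, hnr⟩
            rcases eq_or_lt_of_le (by omega : k₀ + 1 ≤ (k : Int)) with heq | hlt
            · rw [hx, ← heq]
            · exfalso
              have := hch (k₀ + 1) (by omega) hlt
              exact hface ((isWall_iff obs region _).mp this).2
          · intro hx
            have hbd : k₀ ≤ (region.length : Int) := chain_bound obs d region hd c k₀ hchain
            have hkc : (((k₀ + 1).toNat : Nat) : Int) = k₀ + 1 := Int.toNat_of_nonneg (by omega)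
            refine ⟨(k₀ + 1).toNat, by omega, by omega, by rw [hkc]; exact hx, ?_, by rw [hx]; exact hmem⟩
            intro j hj1 hj2; rw [hkc] at hj2; omega
        have hd2 : (decide (∃ k : Nat, k < region.length + 2 ∧ k₀ < (k:Int) ∧ x = pt d c (k:Int) ∧
              (∀ j : Int, k₀ < j → j < (k:Int) → isWall obs region (pt d c j) = true) ∧ x ∉ region) : Bool) =
            decide (x = pt d c (k₀ + 1)) := decide_eq_decide.mpr hiff
        rw [hd2]
        by_cases h1 : x = pt d c (k₀ + 1) <;> simp [h1]

theorem walkA_eq (obs d : Int × Int) (region : List (Int × Int)) (hd : d ≠ (0, 0)) (c : Int × Int)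
    (T : List (Int × Int)) :
    walkA obs d region (region.length + 1) c T = T.filter (fun x => ! discD obs d region c x) := by
  have h := walkA_go obs d region hd c (region.length + 1) 0 T le_rfl
    (by intro j h1 h2; omega) (by push_cast; omega)
  rw [pt_zero] at h
  rw [h]
  rfl

theorem neg_pair_ne (mv : Int × Int) (hmv : mv ≠ (0, 0)) : ((-mv.1, -mv.2) : Int × Int) ≠ (0, 0) := by
  intro hc
  simp only [Prod.mk.injEq, neg_eq_zero] at hc
  exact hmv (Prod.ext hc.1 hc.2)

-- B's backwalk decides hasPrevD
theorem startsRun_go (obs mv : Int × Int) (region S : List (Int × Int)) (hmv : mv ≠ (0, 0)) (x : Int × Int) :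
    ∀ (fuel : Nat) (k₀ : Int), 0 ≤ k₀ →
      (∀ j : Int, 1 ≤ j → j ≤ k₀ → isWall obs region (pt mv x (-j)) = true) →
      (∀ j : Int, 1 ≤ j → j ≤ k₀ → pt mv x (-j) ∉ S) →
      (region.length : Int) + 1 ≤ (fuel : Int) + k₀ →
      (startsRun obs (-mv.1, -mv.2) region S fuel (pt mv x (-(k₀ + 1))) = true ↔
        ¬ HasPrevP obs mv region S x) := by
  have hneg := neg_pair_ne mv hmv
  intro fuel
  induction fuel with
  | zero =>
    intro k₀ hk0 hch hns hfuel
    exfalso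
    have := chain_bound obs (-mv.1, -mv.2) region hneg x k₀ (fun j h1 h2 => by
      rw [pt_neg]; exact hch j h1 h2)
    omega
  | succ fuel ih =>
    intro k₀ hk0 hch hns hfuel
    have hstep : startsRun obs (-mv.1, -mv.2) region S (fuel + 1) (pt mv x (-(k₀ + 1))) =
        (if isWall obs region (pt mv x (-(k₀ + 1))) then
          (if pt mv x (-(k₀ + 1)) ∈ S then false
           else startsRun obs (-mv.1, -mv.2) region S fuel (applyVector (pt mv x (-(k₀ + 1))) (-mv.1, -mv.2)))
         else true) := rfl
    rw [hstep]
    have hback : applyVector (pt mv x (-(k₀ + 1))) (-mv.1, -mv.2) = pt mv x (-(k₀ + 1 + 1)) := by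
      have h1 : pt mv x (-(k₀ + 1)) = pt (-mv.1, -mv.2) x (k₀ + 1) := by rw [pt_neg]
      rw [h1, pt_succ, pt_neg]
    by_cases hW : isWall obs region (pt mv x (-(k₀ + 1))) = true
    · rw [if_pos hW]
      by_cases hS : pt mv x (-(k₀ + 1)) ∈ S
      · rw [if_pos hS]
        refine iff_of_false (by simp) (not_not.mpr ?_)
        refine ⟨k₀ + 1, by omega, ?_, hS⟩
        intro j h1 h2
        by_cases hj : j ≤ k₀
        · exact hch j h1 hj
        · have : j = k₀ + 1 := by omega
          rw [this]; exact hW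
      · rw [if_neg hS, hback]
        refine ih (k₀ + 1) (by omega) ?_ ?_ (by push_cast at hfuel ⊢; omega)
        · intro j h1 h2
          by_cases hj : j ≤ k₀
          · exact hch j h1 hj
          · have : j = k₀ + 1 := by omega
            rw [this]; exact hW
        · intro j h1 h2
          by_cases hj : j ≤ k₀
          · exact hns j h1 hj
          · have : j = k₀ + 1 := by omega
            rw [this]; exact hS
    · rw [if_neg hW]
      refine iff_of_true rfl ?_
      rintro ⟨k, hk1, hchk, hmemk⟩
      by_cases hk : k ≤ k₀
      · exact hns k hk1 hk hmemk
      · have := hchk (k₀ + 1) (by omega) (by omega)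
        exact hW this

-- counting helper: split a filter count by a second predicate
theorem length_filter_split (l : List (Int × Int)) (p q : (Int × Int) → Bool) :
    (l.filter p).length = ((l.filter fun x => q x && p x)).length + ((l.filter fun x => !q x && p x)).length := by
  induction l with
  | nil => simp
  | cons a t ih => by_cases hq : q a <;> by_cases hp : p a <;> simp [hp, hq, ih] <;> omega

-- the number of counted cells, A- and B-agnostic canonical form
def gcount (obs mv : Int × Int) (region X : List (Int × Int)) : Nat :=
  ((X.filter (isWall obs region)).filter (fun x => ! hasPrevD obs mv region (X.filter (isWall obs region)) x)).length

-- membership of x in the maximal wall run through c (along the moveVector line)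
def InRun (obs mv : Int × Int) (region : List (Int × Int)) (c x : Int × Int) : Prop :=
  ∃ i : Int, x = pt mv c i ∧
    ∀ j : Int, min i 0 ≤ j → j ≤ max i 0 → isWall obs region (pt mv c j) = true

-- the two walk-discard predicates together capture exactly the run of c (minus c itself)
theorem disc_or_iff (obs mv : Int × Int) (region : List (Int × Int)) (hmv : mv ≠ (0, 0))
    (c x : Int × Int) (hWc : isWall obs region c = true) (hWx : isWall obs region x = true)
    (hxc : x ≠ c) :
    (discD obs (-mv.1, -mv.2) region c x || discD obs mv region c x) = true ↔
      InRun obs mv region c x := by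
  have hneg := neg_pair_ne mv hmv
  constructor
  · intro h
    have h' : discD obs (-mv.1, -mv.2) region c x = true ∨ discD obs mv region c x = true := by
      simpa using h
    rcases h' with hB | hF
    · obtain ⟨k, hk1, hx, hch, _⟩ := (discD_iff obs _ region hneg c x).mp hB
      rw [pt_neg] at hx
      refine ⟨-k, hx, ?_⟩
      intro j h1 h2
      rcases eq_or_lt_of_le (show -k ≤ j by omega) with heq | hgt
      · rw [← heq, ← hx]; exact hWx
      · rcases eq_or_lt_of_le (show j ≤ 0 by omega) with heq0 | hlt0
        · rw [heq0, pt_zero]; exact hWc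
        · have := hch (-j) (by omega) (by omega)
          rw [pt_neg] at this
          simpa using this
    · obtain ⟨k, hk1, hx, hch, _⟩ := (discD_iff obs mv region hmv c x).mp hF
      refine ⟨k, hx, ?_⟩
      intro j h1 h2
      rcases eq_or_lt_of_le (show j ≤ k by omega) with heq | hgt
      · rw [heq, ← hx]; exact hWx
      · rcases eq_or_lt_of_le (show 0 ≤ j by omega) with heq0 | hlt0
        · rw [← heq0, pt_zero]; exact hWc
        · exact hch j (by omega) hgt
  · rintro ⟨i, hx, hiv⟩
    have hi0 : i ≠ 0 := by
      intro h
      rw [h, pt_zero] at hx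
      exact hxc hx
    rcases lt_or_gt_of_ne hi0 with hn | hp
    · have hBx : discD obs (-mv.1, -mv.2) region c x = true := by
        apply (discD_iff obs _ region hneg c x).mpr
        refine ⟨-i, by omega, by rw [pt_neg]; simpa using hx, ?_, ((isWall_iff obs region x).mp hWx).1⟩
        intro j h1 h2
        rw [pt_neg]
        exact hiv (-j) (by omega) (by omega)
      rw [hBx, Bool.true_or]
    · have hFx : discD obs mv region c x = true := by
        apply (discD_iff obs mv region hmv c x).mpr
        refine ⟨i, by omega, hx, ?_, ((isWall_iff obs region x).mp hWx).1⟩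
        intro j h1 h2
        exact hiv j (by omega) (by omega)
      rw [hFx, Bool.or_true]

-- a backwards wall chain from x ending in the run of c pulls x into the run of c
theorem run_compose (obs mv : Int × Int) (region : List (Int × Int)) (hmv : mv ≠ (0, 0))
    (c x y : Int × Int) (iy k : Int)
    (hy : y = pt mv c iy)
    (hivy : ∀ j : Int, min iy 0 ≤ j → j ≤ max iy 0 → isWall obs region (pt mv c j) = true)
    (hk : 1 ≤ k) (hyx : y = pt mv x (-k))
    (hch : ∀ j : Int, 1 ≤ j → j ≤ k → isWall obs region (pt mv x (-j)) = true)
    (hWx : isWall obs region x = true) :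
    InRun obs mv region c x := by
  have hxeq : x = pt mv c (iy + k) := by
    have h1 : pt mv y k = x := by
      rw [hyx, pt_pt]
      simp [pt_zero]
    rw [← h1, hy, pt_pt]
  refine ⟨iy + k, hxeq, ?_⟩
  intro j h1 h2
  by_cases hc1 : min iy 0 ≤ j ∧ j ≤ max iy 0
  · exact hivy j hc1.1 hc1.2
  · have hrange : iy < j ∧ j ≤ iy + k := by omega
    rcases eq_or_lt_of_le hrange.2 with heq | hlt
    · rw [heq, ← hxeq]; exact hWx
    · have := hch (iy + k - j) (by omega) (by omega)
      have hpt : pt mv x (-(iy + k - j)) = pt mv c j := by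
        rw [hxeq, pt_pt]
        congr 1
        ring
      rw [hpt] at this
      exact this

-- a backwards wall chain from the run cell at index m (m ≤ 0) extends the run downwards
theorem run_extend_down (obs mv : Int × Int) (region : List (Int × Int))
    (c : Int × Int) (m k : Int) (hm : m ≤ 0) (hk : 1 ≤ k)
    (hivm : ∀ j : Int, min m 0 ≤ j → j ≤ max m 0 → isWall obs region (pt mv c j) = true)
    (hch : ∀ j : Int, 1 ≤ j → j ≤ k → isWall obs region (pt mv (pt mv c m) (-j)) = true) :
    InRun obs mv region c (pt mv c (m - k)) := by
  refine ⟨m - k, rfl, ?_⟩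
  intro j h1 h2
  by_cases hj : m ≤ j
  · exact hivm j (by omega) (by omega)
  · have := hch (m - j) (by omega) (by omega)
    have hpt : pt mv (pt mv c m) (-(m - j)) = pt mv c j := by
      rw [pt_pt, show m + -(m - j) = j from by ring]
    rw [hpt] at this
    exact this

-- run indices are bounded by the size of region
theorem run_idx_bound (obs mv : Int × Int) (region : List (Int × Int)) (hmv : mv ≠ (0, 0))
    (c : Int × Int) (i : Int)
    (hiv : ∀ j : Int, min i 0 ≤ j → j ≤ max i 0 → isWall obs region (pt mv c j) = true) :
    -(region.length : Int) ≤ i ∧ i ≤ (region.length : Int) := by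
  have hneg := neg_pair_ne mv hmv
  constructor
  · by_cases h : 0 ≤ i
    · have : (0:Int) ≤ (region.length : Int) := by positivity
      omega
    · have := chain_bound obs (-mv.1, -mv.2) region hneg c (-i) (fun j h1 h2 => by
        rw [pt_neg]
        exact hiv (-j) (by omega) (by omega))
      omega
  · by_cases h : i ≤ 0
    · have : (0:Int) ≤ (region.length : Int) := by positivity
      omega
    · have := chain_bound obs mv region hmv c i (fun j h1 h2 => hiv j (by omega) (by omega))
      omega

-- a nodup list filtered for one of its members has exactly that one element
theorem filter_eq_single (l : List (Int × Int)) (a : Int × Int) (hnd : l.Nodup) (ha : a ∈ l) :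
    (l.filter (· == a)).length = 1 := by
  induction l with
  | nil => simp at ha
  | cons b t ih =>
    rcases List.nodup_cons.mp hnd with ⟨hbt, htnd⟩
    rcases List.mem_cons.mp ha with rfl | hat
    · have hnil : t.filter (· == a) = [] := List.filter_eq_nil_iff.mpr (fun x hx => by
        simp only [beq_iff_eq]
        rintro rfl
        exact hbt hx)
      simp [List.filter_cons, hnil]
    · have hba : (b == a) = false := by
        simp only [beq_eq_false_iff_ne, ne_eq]
        rintro rfl
        exact hbt hat
      simp [List.filter_cons, hba, ih htnd hat]

theorem length_filter_cons (a : Int × Int) (l : List (Int × Int)) (p : (Int × Int) → Bool) :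
    (List.filter p (a :: l)).length = (if p a = true then 1 else 0) + (l.filter p).length := by
  by_cases h : p a = true
  · simp only [List.filter_cons, h, if_true, List.length_cons]
    omega
  · simp [List.filter_cons, h]

-- THE CRUX: popping a wall cell and discarding its whole run removes exactly one counted cell
theorem gcount_step (obs mv : Int × Int) (region : List (Int × Int)) (hmv : mv ≠ (0, 0)) (c : Int × Int)
    (rest : List (Int × Int)) (hnd : (c :: rest).Nodup) (hWc : isWall obs region c = true) :
    gcount obs mv region (c :: rest) =
      1 + gcount obs mv region
        ((rest.filter (fun x => ! discD obs (-mv.1, -mv.2) region c x)).filter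
          (fun x => ! discD obs mv region c x)) := by
  have hneg := neg_pair_ne mv hmv
  have hcnr : c ∉ rest := (List.nodup_cons.mp hnd).1
  have hrnd : rest.Nodup := (List.nodup_cons.mp hnd).2
  have hcons : (c :: rest).filter (isWall obs region) = c :: rest.filter (isWall obs region) :=
    List.filter_cons_of_pos hWc
  -- abbreviation facts
  have hSRmem : ∀ x, x ∈ rest.filter (isWall obs region) ↔
      (x ∈ rest ∧ isWall obs region x = true) := by
    intro x
    simp [List.mem_filter]
  -- the W-cells surviving both walks = the W-cells of rest outside the run
  have hX2 : ((rest.filter (fun x => ! discD obs (-mv.1, -mv.2) region c x)).filter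
        (fun x => ! discD obs mv region c x)).filter (isWall obs region)
      = (rest.filter (isWall obs region)).filter
        (fun x => !(discD obs (-mv.1, -mv.2) region c x || discD obs mv region c x)) := by
    simp only [List.filter_filter]
    apply List.filter_congr
    intro x _
    by_cases h1 : discD obs (-mv.1, -mv.2) region c x <;>
      by_cases h2 : discD obs mv region c x <;>
      by_cases h3 : isWall obs region x <;> simp [h1, h2, h3]
  -- the least run index present in c :: run-part
  have hP0 : pt mv c 0 ∈ c :: (rest.filter (isWall obs region)).filter
        (fun x => discD obs (-mv.1, -mv.2) region c x || discD obs mv region c x) ∧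
      ∀ j : Int, min 0 0 ≤ j → j ≤ max 0 0 → isWall obs region (pt mv c j) = true := by
    constructor
    · rw [pt_zero]; exact List.mem_cons_self
    · intro j h1 h2
      have : j = 0 := by omega
      rw [this, pt_zero]; exact hWc
  obtain ⟨m, hPm, hmin⟩ := Int.exists_least_of_bdd
    (P := fun i => pt mv c i ∈ c :: (rest.filter (isWall obs region)).filter
        (fun x => discD obs (-mv.1, -mv.2) region c x || discD obs mv region c x) ∧
      ∀ j : Int, min i 0 ≤ j → j ≤ max i 0 → isWall obs region (pt mv c j) = true)
    ⟨-(region.length : Int), fun z hz => (run_idx_bound obs mv region hmv c z hz.2).1⟩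
    ⟨0, hP0⟩
  have hm0 : m ≤ 0 := hmin 0 hP0
  -- membership of the run list gives an index with interval
  have hRLidx : ∀ x ∈ c :: (rest.filter (isWall obs region)).filter
        (fun x => discD obs (-mv.1, -mv.2) region c x || discD obs mv region c x),
      isWall obs region x = true ∧ ∃ i : Int, x = pt mv c i ∧
        ∀ j : Int, min i 0 ≤ j → j ≤ max i 0 → isWall obs region (pt mv c j) = true := by
    intro x hx
    rcases List.mem_cons.mp hx with rfl | hxb
    · exact ⟨hWc, 0, (pt_zero mv x).symm, fun j h1 h2 => by
        have : j = 0 := by omega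
        rw [this, pt_zero]; exact hWc⟩
    · obtain ⟨hxSR, hbx⟩ := List.mem_filter.mp hxb
      obtain ⟨hxrest, hWx⟩ := (hSRmem x).mp hxSR
      have hxc : x ≠ c := fun h => hcnr (h ▸ hxrest)
      obtain ⟨i, hxi, hiv⟩ := (disc_or_iff obs mv region hmv c x hWc hWx hxc).mp hbx
      exact ⟨hWx, i, hxi, hiv⟩
  -- O3 pointwise: exactly the minimal run cell is counted
  have hkey : ∀ x ∈ c :: (rest.filter (isWall obs region)).filter
        (fun x => discD obs (-mv.1, -mv.2) region c x || discD obs mv region c x),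
      (! hasPrevD obs mv region (c :: rest.filter (isWall obs region)) x) = (x == pt mv c m) := by
    intro x hx
    obtain ⟨hWx, i, hxi, hiv⟩ := hRLidx x hx
    have hPi : (fun i => pt mv c i ∈ c :: (rest.filter (isWall obs region)).filter
        (fun x => discD obs (-mv.1, -mv.2) region c x || discD obs mv region c x) ∧
      ∀ j : Int, min i 0 ≤ j → j ≤ max i 0 → isWall obs region (pt mv c j) = true) i :=
      ⟨by rw [← hxi]; exact hx, hiv⟩
    have hmi : m ≤ i := hmin i hPi
    by_cases hxm : x = pt mv c m
    · have hnp : ¬ HasPrevP obs mv region (c :: rest.filter (isWall obs region)) x := by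
        rintro ⟨k, hk1, hch, hmem⟩
        have hyc : pt mv x (-k) = pt mv c (m - k) := by
          rw [hxm, pt_pt, show m + -k = m - k from by ring]
        have hWy : isWall obs region (pt mv c (m - k)) = true := by
          have := hch k hk1 le_rfl
          rw [hyc] at this
          exact this
        have hch' : ∀ j : Int, 1 ≤ j → j ≤ k → isWall obs region (pt mv (pt mv c m) (-j)) = true := by
          intro j h1 h2
          have hj := hch j h1 h2
          rw [hxm] at hj
          exact hj
        have hIRy : InRun obs mv region c (pt mv c (m - k)) :=
          run_extend_down obs mv region c m k hm0 hk1 hPm.2 hch'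
        have hymem : pt mv c (m - k) ∈ c :: rest.filter (isWall obs region) := by
          rw [← hyc]
          exact hmem
        rcases List.mem_cons.mp hymem with hy0 | hySR
        · have : m - k = 0 := pt_inj mv c hmv (by rw [pt_zero]; exact hy0)
          omega
        · obtain ⟨iy, hyeq, hivy⟩ := hIRy
          have hiym : iy = m - k := pt_inj mv c hmv hyeq.symm
          have hyc' : pt mv c (m - k) ≠ c := by
            intro h
            have : m - k = 0 := pt_inj mv c hmv (by rw [pt_zero]; exact h)
            omega
          have hyrest : pt mv c (m - k) ∈ rest := ((hSRmem _).mp hySR).1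
          have hby : (discD obs (-mv.1, -mv.2) region c (pt mv c (m - k)) ||
              discD obs mv region c (pt mv c (m - k))) = true :=
            (disc_or_iff obs mv region hmv c _ hWc hWy hyc').mpr ⟨iy, hyeq, hivy⟩
          have hPy : (fun i => pt mv c i ∈ c :: (rest.filter (isWall obs region)).filter
              (fun x => discD obs (-mv.1, -mv.2) region c x || discD obs mv region c x) ∧
              ∀ j : Int, min i 0 ≤ j → j ≤ max i 0 → isWall obs region (pt mv c j) = true) (m - k) := by
            refine ⟨List.mem_cons_of_mem c (List.mem_filter.mpr ⟨hySR, hby⟩), ?_⟩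
            rw [← hiym]
            exact hivy
          have := hmin (m - k) hPy
          omega
      have h1 : hasPrevD obs mv region (c :: rest.filter (isWall obs region)) x = false := by
        rcases Bool.eq_false_or_eq_true (hasPrevD obs mv region
          (c :: rest.filter (isWall obs region)) x) with h | h
        · exact absurd ((hasPrevD_iff obs mv region _ hmv x).mp h) hnp
        · exact h
      rw [h1]
      simp [hxm]
    · have hneq : i ≠ m := by
        intro h
        exact hxm (by rw [hxi, h])
      have hmlt : m < i := by omega
      have hp : HasPrevP obs mv region (c :: rest.filter (isWall obs region)) x := by
        refine ⟨i - m, by omega, ?_, ?_⟩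
        · intro j h1 h2
          have hpt : pt mv x (-j) = pt mv c (i - j) := by
            rw [hxi, pt_pt, show i + -j = i - j from by ring]
          rw [hpt]
          by_cases hj : i - j ≤ 0
          · exact hPm.2 (i - j) (by omega) (by omega)
          · exact hiv (i - j) (by omega) (by omega)
        · have hpt : pt mv x (-(i - m)) = pt mv c m := by
            rw [hxi, pt_pt, show i + -(i - m) = m from by ring]
          rw [hpt]
          rcases List.mem_cons.mp hPm.1 with hy0 | hySR
          · rw [hy0]
            exact List.mem_cons_self
          · exact List.mem_cons_of_mem c (List.mem_filter.mp hySR).1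
      have h1 : hasPrevD obs mv region (c :: rest.filter (isWall obs region)) x = true :=
        (hasPrevD_iff obs mv region _ hmv x).mpr hp
      have h2 : (x == pt mv c m) = false := by
        simp only [beq_eq_false_iff_ne, ne_eq]
        exact hxm
      rw [h1, h2]
      rfl
  -- RL properties
  have hRLnd : (c :: (rest.filter (isWall obs region)).filter
      (fun x => discD obs (-mv.1, -mv.2) region c x || discD obs mv region c x)).Nodup := by
    refine List.nodup_cons.mpr ⟨?_, (hrnd.filter _).filter _⟩
    intro hc
    exact hcnr ((hSRmem c).mp (List.mem_filter.mp hc).1).1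
  have hRL1 : ((c :: (rest.filter (isWall obs region)).filter
      (fun x => discD obs (-mv.1, -mv.2) region c x || discD obs mv region c x)).filter
        (fun x => ! hasPrevD obs mv region (c :: rest.filter (isWall obs region)) x)).length = 1 := by
    rw [List.filter_congr hkey]
    exact filter_eq_single _ _ hRLnd hPm.1
  -- O2 pointwise: outside the run the counted predicate is unchanged
  have hnonrun : ∀ x ∈ (rest.filter (isWall obs region)).filter
        (fun x => !(discD obs (-mv.1, -mv.2) region c x || discD obs mv region c x)),
      (! hasPrevD obs mv region (c :: rest.filter (isWall obs region)) x) =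
      (! hasPrevD obs mv region ((rest.filter (isWall obs region)).filter
        (fun x => !(discD obs (-mv.1, -mv.2) region c x || discD obs mv region c x))) x) := by
    intro x hx
    obtain ⟨hxSR, hnbx⟩ := List.mem_filter.mp hx
    obtain ⟨hxrest, hWx⟩ := (hSRmem x).mp hxSR
    have hxc : x ≠ c := fun h => hcnr (h ▸ hxrest)
    have hnIR : ¬ InRun obs mv region c x := by
      intro hIR
      have := (disc_or_iff obs mv region hmv c x hWc hWx hxc).mpr hIR
      rw [this] at hnbx
      simp at hnbx
    have hiff : HasPrevP obs mv region (c :: rest.filter (isWall obs region)) x ↔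
        HasPrevP obs mv region ((rest.filter (isWall obs region)).filter
          (fun x => !(discD obs (-mv.1, -mv.2) region c x || discD obs mv region c x))) x := by
      constructor
      · rintro ⟨k, hk1, hch, hmem⟩
        refine ⟨k, hk1, hch, ?_⟩
        have hWy : isWall obs region (pt mv x (-k)) = true := hch k hk1 le_rfl
        rcases List.mem_cons.mp hmem with hy0 | hySR
        · exfalso
          apply hnIR
          exact run_compose obs mv region hmv c x (pt mv x (-k)) 0 k
            (by rw [hy0, pt_zero]) (fun j h1 h2 => by
              have : j = 0 := by omega
              rw [this, pt_zero]; exact hWc) hk1 rfl hch hWx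
        · obtain ⟨hyrest, hWy'⟩ := (hSRmem _).mp hySR
          by_cases hby : (discD obs (-mv.1, -mv.2) region c (pt mv x (-k)) ||
              discD obs mv region c (pt mv x (-k))) = true
          · exfalso
            apply hnIR
            have hyc : pt mv x (-k) ≠ c := fun h => hcnr (h ▸ hyrest)
            obtain ⟨iy, hyeq, hivy⟩ := (disc_or_iff obs mv region hmv c _ hWc hWy hyc).mp hby
            exact run_compose obs mv region hmv c x (pt mv x (-k)) iy k hyeq hivy hk1 rfl hch hWx
          · refine List.mem_filter.mpr ⟨hySR, ?_⟩
            rcases Bool.eq_false_or_eq_true (discD obs (-mv.1, -mv.2) region c (pt mv x (-k)) ||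
              discD obs mv region c (pt mv x (-k))) with h | h
            · exact absurd h hby
            · rw [h]
              rfl
      · rintro ⟨k, hk1, hch, hmem⟩
        exact ⟨k, hk1, hch, List.mem_cons_of_mem c (List.mem_filter.mp hmem).1⟩
    by_cases hp : HasPrevP obs mv region (c :: rest.filter (isWall obs region)) x
    · rw [(hasPrevD_iff obs mv region _ hmv x).mpr hp,
        (hasPrevD_iff obs mv region _ hmv x).mpr (hiff.mp hp)]
    · have e1 : hasPrevD obs mv region (c :: rest.filter (isWall obs region)) x = false := by
        rcases Bool.eq_false_or_eq_true (hasPrevD obs mv region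
          (c :: rest.filter (isWall obs region)) x) with h | h
        · exact absurd ((hasPrevD_iff obs mv region _ hmv x).mp h) hp
        · exact h
      have e2 : hasPrevD obs mv region ((rest.filter (isWall obs region)).filter
          (fun x => !(discD obs (-mv.1, -mv.2) region c x || discD obs mv region c x))) x = false := by
        rcases Bool.eq_false_or_eq_true (hasPrevD obs mv region
          ((rest.filter (isWall obs region)).filter
            (fun x => !(discD obs (-mv.1, -mv.2) region c x || discD obs mv region c x))) x) with h | h
        · exact absurd ((hasPrevD_iff obs mv region _ hmv x).mp h) (fun hq => hp (hiff.mpr hq))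
        · exact h
      rw [e1, e2]
  -- assembly
  unfold gcount
  rw [hcons, hX2]
  rw [length_filter_cons]
  rw [length_filter_split (rest.filter (isWall obs region))
    (fun x => ! hasPrevD obs mv region (c :: rest.filter (isWall obs region)) x)
    (fun x => discD obs (-mv.1, -mv.2) region c x || discD obs mv region c x)]
  rw [length_filter_cons] at hRL1
  have hswap1 : (((rest.filter (isWall obs region)).filter
        (fun x => discD obs (-mv.1, -mv.2) region c x || discD obs mv region c x)).filter
          (fun x => ! hasPrevD obs mv region (c :: rest.filter (isWall obs region)) x)) =
      ((rest.filter (isWall obs region)).filter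
      (fun x => (discD obs (-mv.1, -mv.2) region c x || discD obs mv region c x) &&
        ! hasPrevD obs mv region (c :: rest.filter (isWall obs region)) x)) := by
    rw [List.filter_filter]
    apply List.filter_congr
    intro x _
    exact Bool.and_comm _ _
  have hswap2 : (((rest.filter (isWall obs region)).filter
        (fun x => !(discD obs (-mv.1, -mv.2) region c x || discD obs mv region c x))).filter
          (fun x => ! hasPrevD obs mv region (c :: rest.filter (isWall obs region)) x)) =
      ((rest.filter (isWall obs region)).filter
      (fun x => !(discD obs (-mv.1, -mv.2) region c x || discD obs mv region c x) &&
        ! hasPrevD obs mv region (c :: rest.filter (isWall obs region)) x)) := by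
    rw [List.filter_filter]
    apply List.filter_congr
    intro x _
    exact Bool.and_comm _ _
  have hnr : (((rest.filter (isWall obs region)).filter
        (fun x => !(discD obs (-mv.1, -mv.2) region c x || discD obs mv region c x))).filter
          (fun x => ! hasPrevD obs mv region (c :: rest.filter (isWall obs region)) x)) =
      (((rest.filter (isWall obs region)).filter
        (fun x => !(discD obs (-mv.1, -mv.2) region c x || discD obs mv region c x))).filter
          (fun x => ! hasPrevD obs mv region ((rest.filter (isWall obs region)).filter
            (fun x => !(discD obs (-mv.1, -mv.2) region c x || discD obs mv region c x))) x)) :=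
    List.filter_congr hnonrun
  have e1 := congrArg List.length hswap1
  have e2 := congrArg List.length hswap2
  have e3 := congrArg List.length hnr
  split_ifs at hRL1 ⊢ <;> omega

theorem loopA_eq (obs mv : Int × Int) (region : List (Int × Int)) :
    ∀ (fuel : Nat) (T : List (Int × Int)) (walls : Int),
      T.length ≤ fuel → T.Nodup → (∀ c ∈ T, c ∉ region) →
      (mv = (0, 0) → ∀ c ∈ T, applyVector c obs ∉ region) →
      loopA obs mv region fuel T walls = walls + (gcount obs mv region T : Int) := by
  intro fuel
  induction fuel with
  | zero =>
    intro T walls hlen _ _ _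
    have hT : T = [] := by
      cases T with
      | nil => rfl
      | cons a t => simp at hlen
    subst hT
    simp [loopA, gcount]
  | succ fuel ih =>
    intro T walls hlen hnd hdisj hmv0
    cases T with
    | nil => simp [loopA, gcount]
    | cons c rest =>
      by_cases hface : applyVector c obs ∈ region
      · have hmvne : mv ≠ (0, 0) := fun h => (hmv0 h c (List.mem_cons_self)) hface
        have hneg := neg_pair_ne mv hmvne
        have hWc : isWall obs region c = true :=
          (isWall_iff obs region c).mpr ⟨hdisj c List.mem_cons_self, hface⟩
        have hd1 : ((mv.1 * (-1), mv.2 * (-1)) : Int × Int) = (-mv.1, -mv.2) := by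
          simp [mul_neg_one]
        have hd2 : ((mv.1 * 1, mv.2 * 1) : Int × Int) = mv := by
          simp
        have hstep : loopA obs mv region (fuel + 1) (c :: rest) walls =
            loopA obs mv region fuel
              (walkA obs (mv.1 * 1, mv.2 * 1) region (region.length + 1) c
                (walkA obs (mv.1 * (-1), mv.2 * (-1)) region (region.length + 1) c rest))
              (walls + 1) := by
          simp only [loopA, if_pos hface]
        rw [hstep, hd1, hd2, walkA_eq obs (-mv.1, -mv.2) region hneg c rest,
          walkA_eq obs mv region hmvne c]
        set r2 := (rest.filter (fun x => ! discD obs (-mv.1, -mv.2) region c x)).filter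
          (fun x => ! discD obs mv region c x) with hr2
        have hsub : ∀ x ∈ r2, x ∈ rest := by
          intro x hx
          simp only [hr2, List.mem_filter] at hx
          exact hx.1.1
        have hih := ih r2 (walls + 1)
          (by
            have h1 := List.length_filter_le (fun x => ! discD obs mv region c x)
              (rest.filter (fun x => ! discD obs (-mv.1, -mv.2) region c x))
            have h2 := List.length_filter_le (fun x => ! discD obs (-mv.1, -mv.2) region c x) rest
            simp only [List.length_cons] at hlen
            rw [hr2]
            omega)
          (((hnd.of_cons).filter _).filter _)
          (fun x hx => hdisj x (List.mem_cons_of_mem c (hsub x hx)))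
          (fun h => absurd h hmvne)
        rw [hih, gcount_step obs mv region hmvne c rest hnd hWc]
        push_cast
        ring
      · have hWc : isWall obs region c = false := by
          simp [isWall, hface]
        have hstep : loopA obs mv region (fuel + 1) (c :: rest) walls =
            loopA obs mv region fuel rest walls := by
          simp only [loopA, if_neg hface]
        rw [hstep, ih rest walls (by simp only [List.length_cons] at hlen; omega) hnd.of_cons
          (fun x hx => hdisj x (List.mem_cons_of_mem c hx))
          (fun h x hx => hmv0 h x (List.mem_cons_of_mem c hx))]
        have : gcount obs mv region (c :: rest) = gcount obs mv region rest := by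
          simp only [gcount, List.filter_cons, hWc]
          simp
        rw [this]

theorem alt_eq_gcount (obs mv : Int × Int) (adj region : List (Int × Int)) (hnd : adj.Nodup)
    (hmv0 : mv = (0, 0) → ∀ c ∈ adj, applyVector c obs ∉ region) :
    countWallsInDirection_alt obs mv adj region = (gcount obs mv region adj : Int) := by
  have hofl : PySem.Set.ofList (adj.filter (isWall obs region)) = adj.filter (isWall obs region) :=
    PySem.Set.ofList_eq_self_of_nodup _ (hnd.filter _)
  show ((PySem.Set.ofList (adj.filter (isWall obs region))).filter
      (fun c => startsRun obs (-mv.1, -mv.2) region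
        (PySem.Set.ofList (adj.filter (isWall obs region))) (region.length + 1)
        (applyVector c (-mv.1, -mv.2)))).length = (gcount obs mv region adj : Int)
  rw [hofl]
  by_cases hmv : mv = (0, 0)
  · have hS : adj.filter (isWall obs region) = [] := by
      apply List.filter_eq_nil_iff.mpr
      intro c hc
      simp [isWall, hmv0 hmv c hc]
    rw [hS]
    simp [gcount, hS]
  · unfold gcount
    congr 1
    apply congrArg
    apply List.filter_congr
    intro x _
    have hx1 : applyVector x (-mv.1, -mv.2) = pt mv x (-(0 + 1)) := by
      have h0 : x = pt (-mv.1, -mv.2) x 0 := (pt_zero _ x).symm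
      calc applyVector x (-mv.1, -mv.2)
          = applyVector (pt (-mv.1, -mv.2) x 0) (-mv.1, -mv.2) := by rw [← h0]
        _ = pt (-mv.1, -mv.2) x (0 + 1) := pt_succ _ x 0
        _ = pt mv x (-(0 + 1)) := pt_neg mv x (0 + 1)
    rw [hx1]
    have hgo := startsRun_go obs mv region (adj.filter (isWall obs region)) hmv x
      (region.length + 1) 0 le_rfl (by intro j h1 h2; omega) (by intro j h1 h2; omega)
      (by push_cast; omega)
    by_cases hp : HasPrevP obs mv region (adj.filter (isWall obs region)) x
    · have h1 : hasPrevD obs mv region (adj.filter (isWall obs region)) x = true :=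
        (hasPrevD_iff obs mv region _ hmv x).mpr hp
    
      have h2 : startsRun obs (-mv.1, -mv.2) region (adj.filter (isWall obs region))
          (region.length + 1) (pt mv x (-(0 + 1))) = false := by
        rcases Bool.eq_false_or_eq_true (startsRun obs (-mv.1, -mv.2) region
          (adj.filter (isWall obs region)) (region.length + 1) (pt mv x (-(0 + 1)))) with h | h
        · exact absurd hp (hgo.mp h)
        · exact h
      rw [h1, h2]
      rfl
    · have h1 : hasPrevD obs mv region (adj.filter (isWall obs region)) x = false := by
        rcases Bool.eq_false_or_eq_true (hasPrevD obs mv region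
          (adj.filter (isWall obs region)) x) with h | h
        · exact absurd ((hasPrevD_iff obs mv region _ hmv x).mp h) hp
        · exact h
      have h2 : startsRun obs (-mv.1, -mv.2) region (adj.filter (isWall obs region))
          (region.length + 1) (pt mv x (-(0 + 1))) = true := hgo.mpr hp
      rw [h1, h2]
      rfl

-- ===== VERDICT (by name: the statement is the Claim_ definition above) =====
theorem countWallsInDirection_spec : Claim_equal_countWallsInDirection := by
  intro obs mv adj region _hdom hpre
  obtain ⟨hnd, hdisj, hmv0⟩ := hpre
  unfold Spec_countWallsInDirection countWallsInDirection
  rw [loopA_eq obs mv region adj.length adj 0 le_rfl hnd hdisj hmv0,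
    alt_eq_gcount obs mv adj region hnd hmv0]
  simp
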